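-- pv_equiv track=rewrite | github.com/ahmad2493/ai-learning-platform | ai-service/physics_book_metadata_v2.py | iter_lines_with_page_batches
-- ===== SOURCE A (Python) =====
-- from typing import Dict, Iterable, List, Optional, Tuple
--
-- PAGES_PER_BATCH = 5
--
-- def iter_lines_with_page_batches(text: str) -> Iterable[Tuple[int, str, int, int]]:
--     """
--     Iterate over lines with approximate page range.
--
--     The PDF was converted in batches of 5 pages separated by a line containing
--     just '---'. We map:
--         batch 0 -> pages 1-5
--         batch 1 -> pages 6-10
--         ...
--
--     Yields: (line_index, line_text, page_start, page_end)
--     """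
--     lines = text.splitlines()
--     batch_index = 0
--     page_start = 1
--     page_end = page_start + PAGES_PER_BATCH - 1
--
--     for idx, raw in enumerate(lines):
--         if raw.strip() == "---":
--             batch_index += 1
--             page_start = batch_index * PAGES_PER_BATCH + 1
--             page_end = page_start + PAGES_PER_BATCH - 1
--             continue
--         yield idx, raw, page_start, page_end
-- ===== SOURCE B (Python) =====
-- PAGES_PER_BATCH = 5
--
-- def iter_lines_with_page_batches(text):
--     lines = text.splitlines()
--     # split into batch groups at separator lines
--     groups = []
--     cur = []
--     for raw in lines:
--         if raw.strip() == "---":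
--             groups.append(cur)
--             cur = []
--         else:
--             cur.append(raw)
--     groups.append(cur)
--     idx = 0
--     for batch_index, group in enumerate(groups):
--         page_start = batch_index * PAGES_PER_BATCH + 1
--         for raw in group:
--             yield idx, raw, page_start, page_start + 4
--             idx += 1
--         idx += 1  # account for the separator line following this group
-- ===== Notes on version B (the rewrite author's own statement) =====
-- stated objective: alternative
-- what changed: B first splits the line list into batch groups at the separator lines, then emits each group with a page range computed in closed form from the group index and a running global line counter, instead of A's single pass mutating batch/page state per line.
import Mathlib
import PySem

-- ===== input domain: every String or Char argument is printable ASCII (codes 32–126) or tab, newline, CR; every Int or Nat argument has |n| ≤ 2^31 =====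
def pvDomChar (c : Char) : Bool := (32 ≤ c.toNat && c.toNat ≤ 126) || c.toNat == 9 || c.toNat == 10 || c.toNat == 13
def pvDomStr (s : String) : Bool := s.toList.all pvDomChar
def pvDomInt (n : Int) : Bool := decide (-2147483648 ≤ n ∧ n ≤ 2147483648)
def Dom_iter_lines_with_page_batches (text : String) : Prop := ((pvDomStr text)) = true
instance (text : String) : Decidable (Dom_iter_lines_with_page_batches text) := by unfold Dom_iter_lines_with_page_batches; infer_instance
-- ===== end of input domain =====

-- B first splits the lines into batch groups at the separator lines, then emits each
-- group with its page range computed from the group index and a running line counter,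
-- instead of A's single pass mutating batch/page state per line (alternative decomposition).

-- ===== PORT A =====
def pvPAGES_PER_BATCH : Int := 5

-- one iteration of A's for-loop over (idx, raw); state = (batch_index, page_start, page_end, yielded)
def pvStepA (st : Int × Int × Int × List (Int × String × Int × Int)) (p : Int × String) :
    Int × Int × Int × List (Int × String × Int × Int) :=
  if PySem.Str.strip p.2 = "---" then
    let bi := st.1 + 1
    let ps := bi * pvPAGES_PER_BATCH + 1
    let pe := ps + pvPAGES_PER_BATCH - 1
    (bi, ps, pe, st.2.2.2)
  else
    (st.1, st.2.1, st.2.2.1, st.2.2.2 ++ [(p.1, p.2, st.2.1, st.2.2.1)])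

def iter_lines_with_page_batches (text : String) : List (Int × String × Int × Int) :=
  let lines := PySem.Str.splitlines text
  ((PySem.List.enumerate lines 0).foldl pvStepA (0, 1, 1 + pvPAGES_PER_BATCH - 1, [])).2.2.2

-- ===== PORT B =====
-- Source B's first loop: accumulate (groups, cur), splitting at separator lines
def pvSplitGroups (lines : List String) : List (List String) :=
  let st := lines.foldl
    (fun (st : List (List String) × List String) raw =>
      if PySem.Str.strip raw = "---" then (st.1 ++ [st.2], []) else (st.1, st.2 ++ [raw]))
    ([], [])
  st.1 ++ [st.2]

-- Source B's inner loop: yield each line of a group, advancing the running index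
def pvEmitGroup (idx : Int) (ps : Int) : List String → List (Int × String × Int × Int)
  | [] => []
  | raw :: rest => (idx, raw, ps, ps + 4) :: pvEmitGroup (idx + 1) ps rest

-- Source B's outer loop over enumerate(groups): b = batch_index, idx advances past the separator
def pvEmitGroups (idx : Int) (b : Int) : List (List String) → List (Int × String × Int × Int)
  | [] => []
  | g :: gs => pvEmitGroup idx (b * pvPAGES_PER_BATCH + 1) g ++
      pvEmitGroups (idx + g.length + 1) (b + 1) gs

def iter_lines_with_page_batches_alt (text : String) : List (Int × String × Int × Int) :=
  pvEmitGroups 0 0 (pvSplitGroups (PySem.Str.splitlines text))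

-- ===== PRECONDITION & SPEC =====
def Spec_iter_lines_with_page_batches (text : String) (out : List (Int × String × Int × Int)) : Prop := out = iter_lines_with_page_batches_alt text
instance (text : String) (out : List (Int × String × Int × Int)) : Decidable (Spec_iter_lines_with_page_batches text out) := by unfold Spec_iter_lines_with_page_batches; infer_instance

-- ===== CLAIM (what is proved, stated in full; the proofs are below) =====
def Claim_equal_iter_lines_with_page_batches : Prop := ∀ (text : String), Dom_iter_lines_with_page_batches text → Spec_iter_lines_with_page_batches text (iter_lines_with_page_batches text)

-- ===== LEMMAS AND PROOFS =====

-- recursive characterisation of A's loop (batch index b carries page_start = b*5+1, page_end = b*5+5)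
def pvGoA (idx b : Int) : List String → List (Int × String × Int × Int)
  | [] => []
  | l :: ls =>
    if PySem.Str.strip l = "---" then pvGoA (idx + 1) (b + 1) ls
    else (idx, l, b * 5 + 1, b * 5 + 5) :: pvGoA (idx + 1) b ls

theorem pvA_fold (ls : List String) : ∀ (idx b : Int) (acc : List (Int × String × Int × Int)),
    ((PySem.List.enumerate ls idx).foldl pvStepA (b, b * 5 + 1, b * 5 + 5, acc)).2.2.2
      = acc ++ pvGoA idx b ls := by
  induction ls with
  | nil => intro idx b acc; simp [PySem.List.enumerate_nil, pvGoA]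
  | cons l ls ih =>
    intro idx b acc
    rw [PySem.List.enumerate_cons]
    by_cases h : PySem.Str.strip l = "---"
    · simp only [List.foldl_cons, pvStepA, h, if_pos, pvGoA, pvPAGES_PER_BATCH]
      have e1 : (b + 1) * 5 + 1 + 5 - 1 = (b + 1) * 5 + 5 := by ring
      rw [e1]
      exact ih (idx + 1) (b + 1) acc
    · simp only [List.foldl_cons, pvStepA, h, if_neg, not_false_iff, pvGoA]
      rw [ih (idx + 1) b (acc ++ [(idx, l, b * 5 + 1, b * 5 + 5)])]
      simp

-- recursive characterisation of Source B's split loop: (first group, remaining groups)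
def pvSplitRec : List String → List String × List (List String)
  | [] => ([], [])
  | l :: ls =>
    if PySem.Str.strip l = "---" then ([], (pvSplitRec ls).1 :: (pvSplitRec ls).2)
    else (l :: (pvSplitRec ls).1, (pvSplitRec ls).2)

theorem pvSplit_fold (ls : List String) : ∀ (gs : List (List String)) (cur : List String),
    (let st := ls.foldl
        (fun (st : List (List String) × List String) raw =>
          if PySem.Str.strip raw = "---" then (st.1 ++ [st.2], []) else (st.1, st.2 ++ [raw]))
        (gs, cur)
     st.1 ++ [st.2])
      = gs ++ (cur ++ (pvSplitRec ls).1) :: (pvSplitRec ls).2 := by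
  induction ls with
  | nil => intro gs cur; simp [pvSplitRec]
  | cons l ls ih =>
    intro gs cur
    by_cases h : PySem.Str.strip l = "---"
    · simp only [List.foldl_cons, h, if_pos, pvSplitRec]
      rw [ih (gs ++ [cur]) []]
      simp
    · simp only [List.foldl_cons, h, if_neg, not_false_iff, pvSplitRec]
      rw [ih gs (cur ++ [l])]
      simp

theorem pvSplitGroups_eq (ls : List String) :
    pvSplitGroups ls = (pvSplitRec ls).1 :: (pvSplitRec ls).2 := by
  have := pvSplit_fold ls [] []
  simpa [pvSplitGroups] using this

theorem pvGoA_eq_emit (ls : List String) : ∀ (idx b : Int),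
    pvGoA idx b ls = pvEmitGroups idx b ((pvSplitRec ls).1 :: (pvSplitRec ls).2) := by
  induction ls with
  | nil => intro idx b; simp [pvGoA, pvSplitRec, pvEmitGroups, pvEmitGroup]
  | cons l ls ih =>
    intro idx b
    by_cases h : PySem.Str.strip l = "---"
    · simp only [pvGoA, h, if_pos, pvSplitRec]
      rw [ih (idx + 1) (b + 1)]
      simp [pvEmitGroups, pvEmitGroup]
    · simp only [pvGoA, h, if_neg, not_false_iff, pvSplitRec]
      rw [ih (idx + 1) b]
      simp only [pvEmitGroups, pvEmitGroup, pvPAGES_PER_BATCH, List.length_cons]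
      have e2 : b * 5 + 5 = b * 5 + 1 + 4 := by ring
      have e3 : idx + (((pvSplitRec ls).1.length : Int) + 1) + 1
          = idx + 1 + ((pvSplitRec ls).1.length : Int) + 1 := by ring
      rw [e2]
      push_cast
      rw [e3]
      simp

-- ===== VERDICT (by name: the statement is the Claim_ definition above) =====
theorem iter_lines_with_page_batches_spec : Claim_equal_iter_lines_with_page_batches := by
  intro text _
  unfold Spec_iter_lines_with_page_batches iter_lines_with_page_batches
    iter_lines_with_page_batches_alt
  rw [pvSplitGroups_eq, ← pvGoA_eq_emit]
  have h0 : ((0 : Int), (1 : Int), 1 + pvPAGES_PER_BATCH - 1,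
      ([] : List (Int × String × Int × Int)))
      = ((0 : Int), 0 * 5 + 1, 0 * 5 + 5, ([] : List (Int × String × Int × Int))) := by
    norm_num [pvPAGES_PER_BATCH]
  simp only [h0]
  rw [pvA_fold (PySem.Str.splitlines text) 0 0 []]
  simp
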